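-- pv_equiv track=rewrite | github.com/SurajSenapati24/PYTHONwithDataScience | MinorAssignment_4/q15.py | find_column_with_most_ones
-- ===== SOURCE A (Python) =====
-- def find_column_with_most_ones(matrix):
--     column_index = -1
--     max_ones = -1
--     for j in range(4):
--         ones_count = sum(1 for i in range(4) if matrix[i][j] == 1)
--         if ones_count > max_ones:
--             max_ones = ones_count
--             column_index = j
--     return column_index
-- ===== SOURCE B (Python) =====
-- def find_column_with_most_ones(matrix):
--     def ones(j):
--         return [matrix[i][j] for i in range(4)].count(1)
--
--     def best_from(j):
--         # best column index among columns j..3, preferring the earlier one on ties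
--         if j == 3:
--             return 3
--         rest = best_from(j + 1)
--         return j if ones(j) >= ones(rest) else rest
--
--     return best_from(0)
-- ===== Notes on version B (the rewrite author's own statement) =====
-- stated objective: alternative
-- what changed: B replaces A's forward loop with a mutable running maximum by structural recursion on the column index: best_from(j) recursively computes the best column of the suffix j..3 and compares the current column against it with >=, and per-column counts are obtained by materializing the column list and calling .count(1) instead of A's generator sum.
import Mathlib
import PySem

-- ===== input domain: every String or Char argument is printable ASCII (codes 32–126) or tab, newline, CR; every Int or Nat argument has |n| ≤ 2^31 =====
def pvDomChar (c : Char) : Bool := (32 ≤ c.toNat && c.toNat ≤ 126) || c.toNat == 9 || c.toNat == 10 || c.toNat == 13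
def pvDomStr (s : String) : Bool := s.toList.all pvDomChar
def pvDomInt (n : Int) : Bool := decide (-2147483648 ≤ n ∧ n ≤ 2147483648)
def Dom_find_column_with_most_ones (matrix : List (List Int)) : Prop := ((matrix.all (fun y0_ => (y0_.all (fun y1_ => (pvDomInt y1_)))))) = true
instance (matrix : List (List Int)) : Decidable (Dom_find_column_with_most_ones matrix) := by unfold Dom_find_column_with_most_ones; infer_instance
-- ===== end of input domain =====

-- B replaces A's forward running-maximum loop by structural recursion on the column index
-- (best column of the suffix, >= against the best of the rest) with counts via list .count(1).

-- ===== PORT A =====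
def find_column_with_most_ones (matrix : List (List Int)) : Int :=
  -- column_index = -1; max_ones = -1; for j in range(4): ones_count = sum(1 for i in range(4) if matrix[i][j]==1); ...
  let r := (PySem.List.pyRange 0 4 1).foldl (fun (st : Int × Int) j =>
    let ones_count := (PySem.List.pyRange 0 4 1).foldl (fun acc i =>
      if PySem.List.pyGetD (PySem.List.pyGetD matrix i []) j 0 == 1 then acc + 1 else acc) (0 : Int)
    if ones_count > st.2 then (j, ones_count) else st) (-1, -1)
  r.1

-- ===== PORT B =====
-- ones(j) = [matrix[i][j] for i in range(4)].count(1)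
def pvOnes (matrix : List (List Int)) (j : Int) : Int :=
  (((PySem.List.pyRange 0 4 1).map
      (fun i => PySem.List.pyGetD (PySem.List.pyGetD matrix i []) j 0)).count 1 : Nat)

-- best_from(j): Python recurses j → j+1 with base j == 3; transcribed structurally on the
-- remaining depth k = 3 - j (so k = 0 is the base case j = 3, and the k+1 step is column 3-(k+1)).
def pvBestFromAux (matrix : List (List Int)) : Nat → Int
  | 0 => 3
  | k + 1 =>
    let j : Int := 3 - (k + 1 : Nat)
    let rest := pvBestFromAux matrix k
    if pvOnes matrix j ≥ pvOnes matrix rest then j else rest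

def find_column_with_most_ones_alt (matrix : List (List Int)) : Int :=
  pvBestFromAux matrix 3  -- best_from(0)

-- ===== PRECONDITION & SPEC =====
-- Pre_ excludes exactly the inputs on which the Python A raises IndexError: fewer than 4 rows,
-- or one of the first 4 rows shorter than 4 (A reads matrix[i][j] for all i, j < 4; B raises there too).
def Pre_find_column_with_most_ones (matrix : List (List Int)) : Prop :=
  4 ≤ matrix.length ∧ ∀ row ∈ matrix.take 4, 4 ≤ row.length
instance (matrix : List (List Int)) : Decidable (Pre_find_column_with_most_ones matrix) := by
  unfold Pre_find_column_with_most_ones; infer_instance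
def pvWitness_find_column_with_most_ones : List (List Int) :=
  [[1, 0, 0, 0], [0, 1, 0, 1], [1, 1, 0, 0], [0, 1, 1, 0]]

def Spec_find_column_with_most_ones (matrix : List (List Int)) (out : Int) : Prop := out = find_column_with_most_ones_alt matrix
instance (matrix : List (List Int)) (out : Int) : Decidable (Spec_find_column_with_most_ones matrix out) := by unfold Spec_find_column_with_most_ones; infer_instance

-- ===== CLAIM =====
def Claim_equal_find_column_with_most_ones : Prop := ∀ (matrix : List (List Int)), Dom_find_column_with_most_ones matrix → Pre_find_column_with_most_ones matrix → Spec_find_column_with_most_ones matrix (find_column_with_most_ones matrix)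

-- ===== LEMMAS AND PROOFS =====

-- A's inner generator-sum for column j equals B's .count(1) of the materialized column
theorem pvInner_eq (matrix : List (List Int)) (j : Int) :
    (PySem.List.pyRange 0 4 1).foldl (fun acc i =>
      if PySem.List.pyGetD (PySem.List.pyGetD matrix i []) j 0 == 1 then acc + 1 else acc) (0 : Int)
    = pvOnes matrix j := by
  rw [show PySem.List.pyRange 0 4 1 = [0, 1, 2, 3] from by decide]
  unfold pvOnes
  rw [show PySem.List.pyRange 0 4 1 = [0, 1, 2, 3] from by decide]
  simp only [List.foldl, List.map, List.count_cons, List.count_nil]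
  split_ifs <;> simp_all

theorem pvOnes_nonneg (matrix : List (List Int)) (j : Int) : 0 ≤ pvOnes matrix j := by
  unfold pvOnes; positivity

-- A's running-maximum fold over abstract per-column keys, evaluated to B's nested comparisons
set_option maxHeartbeats 1000000 in
theorem pvSelect_eq (f : Int → Int) (h0 : 0 ≤ f 0) :
    (([(0 : Int), 1, 2, 3]).foldl
      (fun (st : Int × Int) j =>
        let ones_count := f j
        if ones_count > st.2 then (j, ones_count) else st) (-1, -1)).1
    = (if f 0 ≥ (if f 1 ≥ (if f 2 ≥ f 3 then f 2 else f 3) then f 1 else (if f 2 ≥ f 3 then f 2 else f 3))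
       then 0
       else if f 1 ≥ (if f 2 ≥ f 3 then f 2 else f 3)
            then 1
            else if f 2 ≥ f 3 then 2 else 3) := by
  simp only [List.foldl]
  split_ifs <;> simp_all <;> omega

-- ===== VERDICT =====
set_option maxHeartbeats 1000000 in
theorem find_column_with_most_ones_spec : Claim_equal_find_column_with_most_ones := by
  intro matrix _ _
  unfold Spec_find_column_with_most_ones find_column_with_most_ones find_column_with_most_ones_alt
  rw [show PySem.List.pyRange 0 4 1 = ([0, 1, 2, 3] : List Int) from by decide]
  refine (pvSelect_eq (fun j => (PySem.List.pyRange 0 4 1).foldl (fun acc i =>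
      if PySem.List.pyGetD (PySem.List.pyGetD matrix i []) j 0 == 1 then acc + 1 else acc) (0 : Int))
    (by beta_reduce; rw [pvInner_eq]; exact pvOnes_nonneg matrix 0)).trans ?_
  simp only [pvInner_eq]
  simp only [pvBestFromAux, apply_ite (pvOnes matrix)]
  norm_num
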